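-- pv_equiv track=rewrite | github.com/Chris-Johnston/Easier68k | src/easier68k/core/util/parsing.py | strip_label
-- ===== SOURCE A (Python) =====
-- def strip_comments(line: str) -> str:
--     """
--     Removes all comments from a line (basically makes this line into the 'compiler' version)
--
--     >>> strip_comments('label TRAP #15 * This does a thing')
--     'label TRAP #15 '
--
--     >>> strip_comments('    ORG start ;label')
--     '    ORG start '
--
--     >>> strip_comments(';    ADD D0, D1 * asdf')
--     ''
--
--     :param line: The line to strip comments from
--     :return: The stripped line
--     """
--     to_return = ''
--     for c in line:
--         if c == ';' or c == '*':
--             break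
--
--         to_return += c
--
--     return to_return
--
-- def strip_label(line: str) -> str:
--     """
--     Strips the label from a line, isolating the rest of the line
--     (side effect: also strips comments)
--
--     >>> strip_label('ORG start')
--     'start'
--
--     >>> strip_label('RTS ;comm')
--     ''
--
--     >>> strip_label(';all commented')
--     ''
--
--     >>> strip_label('MOVE D0, D1 * Moves D0 into D1')
--     'D0, D1 '
--
--     :param line: The line to strip the label from
--     :return: The stripped line
--     """
--
--     stripped = strip_comments(line)
--     if not stripped.strip():  # This line is literally empty after removing comments
--         return ''
--
--     to_return = ''
--     found_space = False
--     found_next = False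
--
--     for c in stripped:
--         if c == ' ' and not found_space:
--             found_space = True
--             continue
--
--         if c != ' ' and found_space and not found_next:
--             found_next = True
--
--         if found_next:
--             to_return += c
--
--     return to_return
-- ===== SOURCE B (Python) =====
-- def strip_label(line: str) -> str:
--     cuts = [i for i in (line.find(';'), line.find('*')) if i != -1]
--     stripped = line[:min(cuts)] if cuts else line
--     if not stripped.strip():
--         return ''
--     _, _, tail = stripped.partition(' ')
--     return tail.lstrip(' ')
-- ===== Notes on version B (the rewrite author's own statement) =====
-- stated objective: faster
-- what changed: Replaced both char-by-char accumulation loops (comment loop with break; the found_space/found_next state machine) by index arithmetic: cutoff index as the minimum of the two comment-starter positions from str.find, one slice, then partition at the first space and left-strip of spaces.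
import Mathlib
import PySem

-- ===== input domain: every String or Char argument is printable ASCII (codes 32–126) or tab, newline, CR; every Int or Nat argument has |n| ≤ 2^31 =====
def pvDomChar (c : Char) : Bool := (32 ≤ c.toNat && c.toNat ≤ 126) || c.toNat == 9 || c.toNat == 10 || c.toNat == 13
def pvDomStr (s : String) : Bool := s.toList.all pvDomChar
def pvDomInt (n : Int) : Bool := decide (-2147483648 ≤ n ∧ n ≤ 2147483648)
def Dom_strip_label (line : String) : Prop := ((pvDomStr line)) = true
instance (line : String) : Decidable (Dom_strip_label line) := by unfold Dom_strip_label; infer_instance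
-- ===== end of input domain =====

-- B replaces A's char-by-char accumulation loops by a cutoff-index/slice/partition decomposition (objective: faster, measured).

-- ===== PORT A =====
-- strip_comments: the for-loop with break, as structural recursion over the chars
def stripCommentsList : List Char → List Char
  | [] => []
  | c :: rest => if c = ';' || c = '*' then [] else c :: stripCommentsList rest

-- the second loop's body: state = (to_return, found_space, found_next)
def stripLabelStep (st : List Char × Bool × Bool) (c : Char) : List Char × Bool × Bool :=
  if c = ' ' && !st.2.1 then (st.1, true, st.2.2)
  else
    let fn := if c ≠ ' ' && st.2.1 && !st.2.2 then true else st.2.2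
    if fn then (st.1 ++ [c], st.2.1, fn) else (st.1, st.2.1, fn)

def strip_label (line : String) : String :=
  let stripped := stripCommentsList line.toList
  if PySem.Chars.strip stripped = [] then ""
  else String.mk (stripped.foldl stripLabelStep ([], false, false)).1

-- ===== PORT B =====
def strip_label_alt (line : String) : String :=
  let cs := line.toList
  let cuts := [PySem.Chars.find cs [';'], PySem.Chars.find cs ['*']].filter (· != -1)
  let stripped := match PySem.List.min? cuts id with
    | some m => PySem.List.slice cs none (some m)   -- line[:min(cuts)]
    | none => cs
  if PySem.Chars.strip stripped = [] then ""
  else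
    -- stripped.partition(' '): tail = chars after the first ' ', or '' if no ' ' (hand port, exact)
    let i := PySem.Chars.find stripped [' ']
    let tail := if i = -1 then [] else stripped.drop (i.toNat + 1)
    -- tail.lstrip(' '): drop leading spaces only (hand port, exact)
    String.mk (tail.dropWhile (· == ' '))

-- ===== PRECONDITION & SPEC =====
def Spec_strip_label (line : String) (out : String) : Prop := out = strip_label_alt line
instance (line : String) (out : String) : Decidable (Spec_strip_label line out) := by unfold Spec_strip_label; infer_instance

-- ===== CLAIM (what is proved, stated in full; the proofs are below) =====
def Claim_equal_strip_label : Prop := ∀ (line : String), Dom_strip_label line → Spec_strip_label line (strip_label line)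

-- ===== LEMMAS AND PROOFS =====

theorem singleton_prefix_iff {a : Char} {l : List Char} : [a] <+: l ↔ l.head? = some a := by
  cases l with
  | nil => simp
  | cons x xs =>
      constructor
      · rintro ⟨t, ht⟩; simp_all
      · intro h; simp at h; exact ⟨xs, by simp [h]⟩

theorem find_singleton (cs : List Char) (c0 : Char) :
    PySem.Chars.find cs [c0] =
      if c0 ∈ cs then ((List.findIdx (· == c0) cs : Nat) : Int) else -1 := by
  by_cases hm : c0 ∈ cs
  · have hinf : [c0] <:+: cs := (List.singleton_infix_iff c0 cs).mpr hm
    have hn : 0 ≤ PySem.Chars.find cs [c0] := (PySem.Chars.find_nonneg_iff cs [c0]).mpr hinf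
    obtain ⟨hpre, hmin⟩ := PySem.Chars.find_spec hn
    set k := (PySem.Chars.find cs [c0]).toNat with hk
    have hget : cs[k]? = some c0 := by
      have := singleton_prefix_iff.mp hpre
      simpa [List.head?_drop] using this
    obtain ⟨hklt, hv⟩ := List.getElem?_eq_some_iff.mp hget
    have hidx : List.findIdx (· == c0) cs = k := by
      rw [List.findIdx_eq hklt]
      refine ⟨by simp [hv], ?_⟩
      intro j hj
      have hne : cs[j]? ≠ some c0 := by
        intro h
        exact hmin j hj (singleton_prefix_iff.mpr (by simp [List.head?_drop, h]))
      have hjl : j < cs.length := lt_trans hj hklt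
      simp only [List.getElem?_eq_getElem hjl] at hne
      simpa using fun e => hne (by rw [e])
    rw [if_pos hm, hidx, hk, Int.toNat_of_nonneg hn]
  · have hinf : ¬ [c0] <:+: cs := fun h => hm ((List.singleton_infix_iff c0 cs).mp h)
    rw [if_neg hm, (PySem.Chars.find_eq_neg_one_iff cs [c0]).mpr hinf]

-- stripped_B = take (min n1 n2) where n i = findIdx
theorem stripComments_eq_takeWhile (cs : List Char) :
    stripCommentsList cs = cs.takeWhile (fun c => !(c = ';' || c = '*')) := by
  induction cs with
  | nil => rfl
  | cons c rest ih =>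
      by_cases h1 : c = ';' <;> by_cases h2 : c = '*' <;>
        simp [stripCommentsList, h1, h2, ih]

theorem takeWhile_eq_take_min (cs : List Char) :
    cs.takeWhile (fun c => !(c = ';' || c = '*')) =
      cs.take (min (List.findIdx (· == ';') cs) (List.findIdx (· == '*') cs)) := by
  induction cs with
  | nil => rfl
  | cons c rest ih =>
      by_cases h1 : c = ';'
      · simp [List.findIdx_cons, h1]
      · by_cases h2 : c = '*'
        · simp [List.findIdx_cons, h1, h2]
        · have e1 : (c == ';') = false := by simp [h1]
          have e2 : (c == '*') = false := by simp [h2]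
          simp only [List.findIdx_cons, List.takeWhile_cons, e1, e2, h1, h2,
            decide_false, Bool.false_or, Bool.not_false, Bool.true_and, cond_false,
            Nat.succ_min_succ, List.take_succ_cons, ih]
          simp [decide_eq_false h1, decide_eq_false h2]

theorem dropWhile_ne_eq_drop_findIdx (l : List Char) :
    l.dropWhile (fun c => !(c = ' ')) = l.drop (List.findIdx (· == ' ') l) := by
  induction l with
  | nil => rfl
  | cons c rest ih =>
      by_cases h : c = ' '
      · simp [List.findIdx_cons, h]
      · have e : (c == ' ') = false := by simp [h]
        simp [List.findIdx_cons, List.dropWhile_cons, e, h, ih]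

-- characterisation of A's state machine
theorem foldl_step_true (l : List Char) (tr : List Char) :
    (l.foldl stripLabelStep (tr, true, true)).1 = tr ++ l := by
  induction l generalizing tr with
  | nil => simp
  | cons c rest ih =>
      by_cases h : c = ' ' <;> simp [stripLabelStep, h, ih]

theorem foldl_step_space (l : List Char) (tr : List Char) :
    (l.foldl stripLabelStep (tr, true, false)).1 = tr ++ l.dropWhile (· == ' ') := by
  induction l generalizing tr with
  | nil => simp
  | cons c rest ih =>
      by_cases h : c = ' '
      · simpa [stripLabelStep, h] using ih tr
      · simp [stripLabelStep, h, foldl_step_true]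

theorem foldl_step_init (l : List Char) :
    (l.foldl stripLabelStep ([], false, false)).1 =
      ((l.dropWhile (fun c => !(c = ' '))).drop 1).dropWhile (· == ' ') := by
  induction l with
  | nil => simp
  | cons c rest ih =>
      by_cases h : c = ' '
      · simp [stripLabelStep, h, foldl_step_space]
      · simpa [stripLabelStep, h] using ih

-- the B-side tail computation equals A's state machine result
theorem tail_part (l : List Char) :
    (l.foldl stripLabelStep ([], false, false)).1 =
      ((if PySem.Chars.find l [' '] = -1 then []
        else l.drop ((PySem.Chars.find l [' ']).toNat + 1)).dropWhile (· == ' ')) := by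
  rw [foldl_step_init, dropWhile_ne_eq_drop_findIdx, List.drop_drop, find_singleton]
  by_cases h : ' ' ∈ l
  · rw [if_pos h]
    have : ¬ ((((List.findIdx (· == ' ') l : Nat)) : Int) = -1) := by omega
    rw [if_neg this]
    simp
  · have hlen : List.findIdx (· == ' ') l = l.length := by
      rw [List.findIdx_eq_length]
      intro x hx
      simp only [beq_eq_false_iff_ne]
      rintro rfl; exact h hx
    rw [if_neg h, if_pos rfl, hlen]
    have : List.drop (l.length + 1) l = [] := by
      rw [List.drop_eq_nil_iff]; omega
    rw [this]

-- B's cutoff-and-slice equals take (min findIdx findIdx)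
theorem stripped_B_eq (cs : List Char) :
    (match PySem.List.min?
        ([PySem.Chars.find cs [';'], PySem.Chars.find cs ['*']].filter (· != -1)) id with
      | some m => PySem.List.slice cs none (some m)
      | none => cs) =
      cs.take (min (List.findIdx (· == ';') cs) (List.findIdx (· == '*') cs)) := by
  rw [find_singleton, find_singleton]
  set n1 := List.findIdx (· == ';') cs with hn1
  set n2 := List.findIdx (· == '*') cs with hn2
  have hne : ∀ n : Nat, (((n : Int)) != -1) = true := by intro n; simp [bne]
  have habsent : ∀ (c0 : Char), c0 ∉ cs → List.findIdx (· == c0) cs = cs.length := by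
    intro c0 hc
    rw [List.findIdx_eq_length]
    intro x hx
    simp only [beq_eq_false_iff_ne]
    rintro rfl; exact hc hx
  by_cases h1 : ';' ∈ cs <;> by_cases h2 : '*' ∈ cs
  · have l1 : n1 < cs.length := List.findIdx_lt_length.mpr ⟨';', h1, by simp⟩
    have l2 : n2 < cs.length := List.findIdx_lt_length.mpr ⟨'*', h2, by simp⟩
    rw [if_pos h1, if_pos h2]
    have hf : List.filter (· != -1) [((n1 : Nat) : Int), ((n2 : Nat) : Int)]
        = [((n1 : Nat) : Int), ((n2 : Nat) : Int)] := by simp [hne]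
    rw [hf]
    by_cases hlt : (((n2 : Nat)) : Int) < ((n1 : Nat) : Int)
    · have hmin : PySem.List.min? [((n1 : Nat) : Int), ((n2 : Nat) : Int)] id
          = some ((n2 : Nat) : Int) := by simp [PySem.List.min?, hlt]
      rw [hmin]
      show PySem.List.slice cs none (some ((n2 : Nat) : Int)) = _
      rw [PySem.List.slice_to cs (by omega)]
      congr 1; omega
    · have hmin : PySem.List.min? [((n1 : Nat) : Int), ((n2 : Nat) : Int)] id
          = some ((n1 : Nat) : Int) := by simp [PySem.List.min?, hlt]
      rw [hmin]
      show PySem.List.slice cs none (some ((n1 : Nat) : Int)) = _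
      rw [PySem.List.slice_to cs (by omega)]
      congr 1; omega
  · have l1 : n1 < cs.length := List.findIdx_lt_length.mpr ⟨';', h1, by simp⟩
    have hlen2 : n2 = cs.length := habsent '*' h2
    rw [if_pos h1, if_neg h2]
    have hf : List.filter (· != -1) [((n1 : Nat) : Int), (-1 : Int)]
        = [((n1 : Nat) : Int)] := by simp [hne]
    rw [hf]
    have hmin : PySem.List.min? [((n1 : Nat) : Int)] id = some ((n1 : Nat) : Int) := by
      simp [PySem.List.min?]
    rw [hmin]
    show PySem.List.slice cs none (some ((n1 : Nat) : Int)) = _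
    rw [PySem.List.slice_to cs (by omega)]
    congr 1; omega
  · have hlen1 : n1 = cs.length := habsent ';' h1
    have l2 : n2 < cs.length := List.findIdx_lt_length.mpr ⟨'*', h2, by simp⟩
    rw [if_neg h1, if_pos h2]
    have hf : List.filter (· != -1) [(-1 : Int), ((n2 : Nat) : Int)]
        = [((n2 : Nat) : Int)] := by simp [hne]
    rw [hf]
    have hmin : PySem.List.min? [((n2 : Nat) : Int)] id = some ((n2 : Nat) : Int) := by
      simp [PySem.List.min?]
    rw [hmin]
    show PySem.List.slice cs none (some ((n2 : Nat) : Int)) = _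
    rw [PySem.List.slice_to cs (by omega)]
    congr 1; omega
  · have hlen1 : n1 = cs.length := habsent ';' h1
    have hlen2 : n2 = cs.length := habsent '*' h2
    rw [if_neg h1, if_neg h2]
    have hf : List.filter (· != -1) [(-1 : Int), (-1 : Int)] = [] := by simp
    rw [hf]
    have hmin : PySem.List.min? ([] : List Int) id = none := by simp [PySem.List.min?]
    rw [hmin]
    show cs = _
    rw [hlen1, hlen2, Nat.min_self, List.take_length]

-- ===== VERDICT (by name: the statement is the Claim_ definition above) =====
theorem strip_label_spec : Claim_equal_strip_label := by
  intro line _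
  unfold Spec_strip_label strip_label strip_label_alt
  simp only [stripped_B_eq, stripComments_eq_takeWhile, takeWhile_eq_take_min]
  split_ifs with hguard hfind
  · rfl
  · rw [tail_part, if_pos hfind]
  · rw [tail_part, if_neg hfind]
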